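-- pv_equiv track=rewrite | github.com/DS-Pokemon-Rom-Editor/scrcmd-database | scripts/sync_from_decomp.py | split_macro_args
-- ===== SOURCE A (Python) =====
-- def split_macro_args(args_str: str) -> list[str]:
--     """
--     Split a macro argument string into normalized arguments.
--
--     Rules:
--     - Split on top-level commas first
--     - Within each comma-separated segment, split on whitespace only when the
--       segment is just multiple plain tokens (e.g. "CONST \\arg")
--     - Keep arithmetic/comparison expressions together (e.g. "\\lower + 1")
--     """
--     comma_parts = []
--     current = []
--     paren_depth = 0
--
--     for char in args_str:
--         if char == "," and paren_depth == 0: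
--             part = "".join(current).strip()
--             if part:
--                 comma_parts.append(part)
--             current = []
--             continue
--
--         if char == "(":
--             paren_depth += 1
--         elif char == ")" and paren_depth > 0:
--             paren_depth -= 1
--
--         current.append(char)
--
--     tail = "".join(current).strip()
--     if tail:
--         comma_parts.append(tail)
--
--     args = []
--     operator_tokens = {
--         "+",
--         "-",
--         "*",
--         "/",
--         "%",
--         "<<",
--         ">>",
--         "&",
--         "|",
--         "^",
--         "&&",
--         "||",
--         "==",
--         "!=",
--         "<",
--         ">",
--         "<=",
--         ">=",
--     }
--
--     for part in comma_parts:
--         tokens = part.split()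
--         if len(tokens) <= 1:
--             args.append(part)
--             continue
--
--         if any(token in operator_tokens for token in tokens):
--             args.append(part)
--             continue
--
--         args.extend(tokens)
--
--     return args
-- ===== SOURCE B (Python) =====
-- OPERATORS = frozenset({
--     "+", "-", "*", "/", "%", "<<", ">>", "&", "|", "^",
--     "&&", "||", "==", "!=", "<", ">", "<=", ">=",
-- })
--
--
-- def _normalize(seg: str) -> list[str]:
--     part = seg.strip()
--     if not part:
--         return []
--     tokens = part.split()
--     if len(tokens) > 1 and OPERATORS.isdisjoint(tokens):
--         return tokens
--     return [part]
--
--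
-- def split_macro_args(args_str: str) -> list[str]:
--     # Split naively on every comma, then merge pieces back together while a
--     # parenthesis balance (')' ignored at balance 0) is open.
--     pieces = args_str.split(",")
--     segments = []
--     buf = None
--     bal = 0
--     for piece in pieces:
--         buf = piece if buf is None else buf + "," + piece
--         for ch in piece:
--             if ch == "(":
--                 bal += 1
--             elif ch == ")" and bal > 0:
--                 bal -= 1
--         if bal == 0:
--             segments.append(buf)
--             buf = None
--     if buf is not None:
--         segments.append(buf)
--     return [arg for seg in segments for arg in _normalize(seg)]
-- ===== Notes on version B (the rewrite author's own statement) =====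
-- stated objective: alternative
-- what changed: Replaces A's single character-by-character scan (depth counter plus growing character buffer, then a second accumulator loop) by split-on-every-comma followed by a piece-merging pass that re-joins pieces while the parenthesis balance is open, with per-segment normalization factored into a helper flattened by one comprehension.
import Mathlib
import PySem

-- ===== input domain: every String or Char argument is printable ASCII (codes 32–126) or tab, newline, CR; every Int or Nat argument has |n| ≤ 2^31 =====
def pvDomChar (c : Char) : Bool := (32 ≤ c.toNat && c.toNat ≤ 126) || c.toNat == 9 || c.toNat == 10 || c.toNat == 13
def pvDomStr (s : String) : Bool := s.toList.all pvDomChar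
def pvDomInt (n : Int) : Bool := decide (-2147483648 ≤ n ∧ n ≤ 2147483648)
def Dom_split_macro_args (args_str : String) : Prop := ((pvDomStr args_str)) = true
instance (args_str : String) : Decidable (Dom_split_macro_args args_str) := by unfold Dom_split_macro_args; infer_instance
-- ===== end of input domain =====

-- B replaces A's single depth-tracking character scan by split-on-every-comma + balance-guided
-- merge of the pieces + a per-segment normalization helper; same return value (alternative decomposition).

-- ===== PORT A =====
-- A's main for-loop: state (comma_parts, current, paren_depth); strings are List Char.
def pvALoop : List Char → List (List Char) → List Char → Nat → List (List Char) × List Char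
  | [], parts, current, _ => (parts, current)
  | c :: cs, parts, current, depth =>
    if c = ',' ∧ depth = 0 then
      let part := PySem.Chars.strip current
      pvALoop cs (if part ≠ [] then parts ++ [part] else parts) [] depth
    else
      let depth' := if c = '(' then depth + 1
                    else if c = ')' ∧ 0 < depth then depth - 1 else depth
      pvALoop cs parts (current ++ [c]) depth'

-- A's operator_tokens set literal
def pvAOps : PySem.Set (List Char) := PySem.Set.ofList
  [['+'], ['-'], ['*'], ['/'], ['%'], ['<','<'], ['>','>'], ['&'], ['|'], ['^'],
   ['&','&'], ['|','|'], ['=','='], ['!','='], ['<'], ['>'], ['<','='], ['>','=']]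

-- A's second loop over comma_parts accumulating args
def pvAPost : List (List Char) → List (List Char) → List (List Char)
  | [], args => args
  | part :: rest, args =>
    let tokens := PySem.Chars.split₀ part
    if tokens.length ≤ 1 then pvAPost rest (args ++ [part])
    else if tokens.any (fun t => PySem.Set.contains pvAOps t) then pvAPost rest (args ++ [part])
    else pvAPost rest (args ++ tokens)

def split_macro_args (args_str : String) : List String :=
  let r := pvALoop args_str.toList [] [] 0
  let tail := PySem.Chars.strip r.2
  let commaParts := if tail ≠ [] then r.1 ++ [tail] else r.1
  (pvAPost commaParts []).map String.mk

-- ===== PORT B =====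
-- B's inner per-piece balance loop
def pvBBal : List Char → Nat → Nat
  | [], bal => bal
  | c :: cs, bal =>
      pvBBal cs (if c = '(' then bal + 1 else if c = ')' ∧ 0 < bal then bal - 1 else bal)

-- B's merge loop over the naively comma-split pieces (buf = None ↦ none)
def pvBMerge : List (List Char) → Option (List Char) → Nat → List (List Char)
  | [], buf, _ => match buf with | none => [] | some b => [b]
  | p :: rest, buf, bal =>
    let b := match buf with | none => p | some bb => bb ++ ',' :: p
    let bal' := pvBBal p bal
    if bal' = 0 then b :: pvBMerge rest none 0 else pvBMerge rest (some b) bal'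

-- B's OPERATORS frozenset
def pvBOps : PySem.Set (List Char) := PySem.Set.ofList
  [['+'], ['-'], ['*'], ['/'], ['%'], ['<','<'], ['>','>'], ['&'], ['|'], ['^'],
   ['&','&'], ['|','|'], ['=','='], ['!','='], ['<'], ['>'], ['<','='], ['>','=']]

-- B's _normalize helper
def pvBNorm (seg : List Char) : List (List Char) :=
  let part := PySem.Chars.strip seg
  if part = [] then []
  else
    let tokens := PySem.Chars.split₀ part
    if 1 < tokens.length ∧ PySem.Set.isdisjoint pvBOps tokens = true then tokens
    else [part]

def split_macro_args_alt (args_str : String) : List String :=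
  let segs := pvBMerge (PySem.Chars.splitOn args_str.toList [',']) none 0
  (segs.flatMap pvBNorm).map String.mk

-- ===== PRECONDITION & SPEC =====
def Spec_split_macro_args (args_str : String) (out : List String) : Prop := out = split_macro_args_alt args_str
instance (args_str : String) (out : List String) : Decidable (Spec_split_macro_args args_str out) := by unfold Spec_split_macro_args; infer_instance

-- ===== CLAIM (what is proved, stated in full; the proofs are below) =====
def Claim_equal_split_macro_args : Prop := ∀ (args_str : String), Dom_split_macro_args args_str → Spec_split_macro_args args_str (split_macro_args args_str)

-- ===== LEMMAS AND PROOFS =====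

-- simple recursive characterization of str.split(",")
def pvSplit : List Char → List (List Char)
  | [] => [[]]
  | c :: cs => if c = ',' then [] :: pvSplit cs else (pvSplit cs).modifyHead (c :: ·)

lemma pvSplit_shape (cs : List Char) : ∃ hh tt, pvSplit cs = hh :: tt := by
  induction cs with
  | nil => exact ⟨[], [], rfl⟩
  | cons c cs ih =>
    obtain ⟨hh, tt, h⟩ := ih
    by_cases hc : c = ','
    · exact ⟨[], pvSplit cs, by simp [pvSplit, hc]⟩
    · exact ⟨c :: hh, tt, by simp [pvSplit, hc, h, List.modifyHead]⟩

lemma pvSplit_ne_nil (cs : List Char) : pvSplit cs ≠ [] := by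
  obtain ⟨hh, tt, h⟩ := pvSplit_shape cs
  simp [h]

lemma splitOn_go_eq : ∀ (fuel : Nat) (l cur : List Char) (acc : List (List Char)),
    l.length < fuel →
    PySem.Chars.splitOn.go [','] fuel l cur acc
      = acc.reverse ++ (pvSplit l).modifyHead (cur.reverse ++ ·) := by
  intro fuel
  induction fuel with
  | zero => intro l cur acc h; omega
  | succ f ih =>
    intro l cur acc h
    cases l with
    | nil =>
      simp [PySem.Chars.splitOn.go, pvSplit]
    | cons c rest =>
      by_cases hc : c = ','
      · subst hc
        have hpre : List.isPrefixOf [','] (',' :: rest) = true := by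
          simp [List.isPrefixOf]
        simp only [PySem.Chars.splitOn.go, hpre, if_true, List.length_cons, List.drop_succ_cons,
          List.length_nil, List.drop_zero]
        rw [ih rest [] (cur.reverse :: acc) (by simp at h; omega)]
        obtain ⟨hh, tt, hrw⟩ := pvSplit_shape rest
        simp [pvSplit, hrw, List.modifyHead]
      · have hpre : List.isPrefixOf [','] (c :: rest) = false := by
          simp [List.isPrefixOf]
          exact fun hh => absurd hh.symm hc
        simp only [PySem.Chars.splitOn.go, hpre, Bool.false_eq_true, if_false]
        rw [ih rest (c :: cur) acc (by simp at h; omega)]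
        obtain ⟨hh, tt, hrw⟩ := pvSplit_shape rest
        simp [pvSplit, hc, hrw, List.modifyHead]

lemma splitOn_comma (cs : List Char) : PySem.Chars.splitOn cs [','] = pvSplit cs := by
  have h := splitOn_go_eq (cs.length + 1) cs [] [] (by omega)
  obtain ⟨hh, tt, hrw⟩ := pvSplit_shape cs
  simpa [PySem.Chars.splitOn, hrw, List.modifyHead] using h

-- joining the pieces back with commas
def pvJoin : List (List Char) → List Char
  | [] => []
  | [p] => p
  | p :: q :: r => p ++ ',' :: pvJoin (q :: r)

lemma pvJoin_pvSplit (cs : List Char) : pvJoin (pvSplit cs) = cs := by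
  induction cs with
  | nil => simp [pvSplit, pvJoin]
  | cons c cs ih =>
    obtain ⟨hh, tt, hrw⟩ := pvSplit_shape cs
    by_cases hc : c = ','
    · subst hc
      simp only [pvSplit]
      rw [hrw] at ih ⊢
      simp [pvJoin, ih]
    · simp only [pvSplit, hc, if_false]
      rw [hrw] at ih ⊢
      cases tt with
      | nil => simpa [pvJoin, List.modifyHead] using congrArg (c :: ·) ih
      | cons q r => simpa [pvJoin, List.modifyHead] using congrArg (c :: ·) ih

lemma pvSplit_no_comma (cs : List Char) : ∀ p ∈ pvSplit cs, ',' ∉ p := by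
  induction cs with
  | nil => simp [pvSplit]
  | cons c cs ih =>
    by_cases hc : c = ','
    · subst hc
      simp only [pvSplit]
      intro p hp
      rcases List.mem_cons.1 hp with hp | hp
      · simp [hp]
      · exact ih p hp
    · simp only [pvSplit, hc, if_false]
      obtain ⟨hh, tt, hrw⟩ := pvSplit_shape cs
      rw [hrw]
      rw [hrw] at ih
      intro p hp
      rcases List.mem_cons.1 hp with hp | hp
      · subst hp
        intro hmem
        rcases List.mem_cons.1 hmem with h1 | h1
        · exact hc h1.symm
        · exact ih hh (by simp) h1
      · exact ih p (by simp [hp])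

-- A's scan through a comma-free block
lemma scan_nocomma : ∀ (cs rest : List Char) (parts : List (List Char)) (cur : List Char) (d : Nat),
    ',' ∉ cs →
    pvALoop (cs ++ rest) parts cur d = pvALoop rest parts (cur ++ cs) (pvBBal cs d) := by
  intro cs
  induction cs with
  | nil => intro rest parts cur d _; simp [pvBBal]
  | cons c cs ih =>
    intro rest parts cur d hnc
    have hc : c ≠ ',' := by intro h; exact hnc (by simp [h])
    have hcs : ',' ∉ cs := fun h => hnc (by simp [h])
    simp only [List.cons_append, pvALoop]
    rw [if_neg (by intro h; exact hc h.1)]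
    rw [ih rest parts (cur ++ [c]) _ hcs]
    simp [pvBBal]

def pvEmit (x : List Char) : List (List Char) := if x = [] then [] else [x]

def pvCur : Option (List Char) → List Char
  | none => []
  | some b => b ++ [',']

lemma pvCur_append (buf : Option (List Char)) (p : List Char) :
    pvCur buf ++ p = (match buf with | none => p | some bb => bb ++ ',' :: p) := by
  cases buf <;> simp [pvCur]

def pvFinish (r : List (List Char) × List Char) : List (List Char) :=
  r.1 ++ pvEmit (PySem.Chars.strip r.2)

lemma emit_append (parts : List (List Char)) (part : List Char) :
    (if PySem.Chars.strip part ≠ [] then parts ++ [PySem.Chars.strip part] else parts)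
      = parts ++ pvEmit (PySem.Chars.strip part) := by
  by_cases h : PySem.Chars.strip part = [] <;> simp [pvEmit, h]

lemma scan_main : ∀ (L : List (List Char)) (buf : Option (List Char)) (d : Nat)
    (parts : List (List Char)), L ≠ [] → (∀ p ∈ L, ',' ∉ p) →
    pvFinish (pvALoop (pvJoin L) parts (pvCur buf) d)
      = parts ++ (pvBMerge L buf d).flatMap (fun s => pvEmit (PySem.Chars.strip s)) := by
  intro L
  induction L with
  | nil => intro _ _ _ h _; exact absurd rfl h
  | cons p rest ih =>
    intro buf d parts _ hnc
    have hp : ',' ∉ p := hnc p (by simp)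
    cases rest with
    | nil =>
      have hj : pvJoin [p] = p := rfl
      rw [hj, show p = p ++ [] from (List.append_nil p).symm,
        scan_nocomma p [] parts (pvCur buf) d hp]
      simp only [pvALoop, pvFinish, pvBMerge]
      rw [pvCur_append]
      split
      · simp [pvEmit]
      · simp [pvEmit]
    | cons q r =>
      have hj : pvJoin (p :: q :: r) = p ++ ',' :: pvJoin (q :: r) := rfl
      rw [hj, scan_nocomma p (',' :: pvJoin (q :: r)) parts (pvCur buf) d hp]
      by_cases hb : pvBBal p d = 0
      · -- top-level comma: A cuts here, B emits the buffer
        rw [hb]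
        simp only [pvALoop]
        rw [if_pos (by simp), emit_append]
        have ihr := ih none 0 (parts ++ pvEmit (PySem.Chars.strip (pvCur buf ++ p)))
          (by simp) (fun x hx => hnc x (by simp [hx]))
        rw [show pvCur none = ([] : List Char) from rfl] at ihr
        rw [ihr]
        simp only [pvBMerge]
        rw [if_pos hb, ← pvCur_append]
        simp
      · -- comma inside parens: both re-join with ','
        simp only [pvALoop]
        rw [if_neg (by intro h; exact hb h.2)]
        have hstep : (if (',' : Char) = '(' then pvBBal p d + 1
            else if (',' : Char) = ')' ∧ 0 < pvBBal p d then pvBBal p d - 1 else pvBBal p d)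
            = pvBBal p d := by
          rw [if_neg (by decide), if_neg (fun hh => absurd hh.1 (by decide))]
        rw [hstep]
        have hcur : pvCur buf ++ p ++ [','] = pvCur (some (pvCur buf ++ p)) := by simp [pvCur]
        rw [hcur]
        have ihr := ih (some (pvCur buf ++ p)) (pvBBal p d) parts (by simp)
          (fun x hx => hnc x (by simp [hx]))
        rw [ihr]
        simp only [pvBMerge]
        rw [if_neg hb, ← pvCur_append]

-- A's per-part rule, as a function
def pvRuleA (part : List Char) : List (List Char) :=
  let tokens := PySem.Chars.split₀ part
  if tokens.length ≤ 1 then [part]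
  else if tokens.any (fun t => PySem.Set.contains pvAOps t) then [part]
  else tokens

lemma pvAPost_eq_flatMap : ∀ (ps args : List (List Char)),
    pvAPost ps args = args ++ ps.flatMap pvRuleA := by
  intro ps
  induction ps with
  | nil => intro args; simp [pvAPost]
  | cons part rest ih =>
    intro args
    simp only [pvAPost, pvRuleA, List.flatMap_cons]
    split
    · rw [ih]; simp
    · split
      · rw [ih]; simp
      · rw [ih]; simp

lemma any_eq_not_isdisjoint (tokens : List (List Char)) :
    tokens.any (fun t => PySem.Set.contains pvAOps t) = !(PySem.Set.isdisjoint pvBOps tokens) := by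
  have hset : pvAOps = pvBOps := rfl
  cases h : PySem.Set.isdisjoint pvBOps tokens with
  | false =>
    have h' : ¬ (∀ x ∈ pvBOps, x ∉ tokens) := by
      intro hall
      rw [(PySem.Set.isdisjoint_iff _ _).2 hall] at h
      exact Bool.noConfusion h
    obtain ⟨x, hx, hxt⟩ : ∃ x ∈ pvBOps, x ∈ tokens := by
      by_contra hcon
      exact h' fun x hx hxt => hcon ⟨x, hx, hxt⟩
    simp only [Bool.not_false]
    refine List.any_eq_true.2 ⟨x, hxt, ?_⟩
    rw [hset]
    exact (PySem.Set.contains_iff _ _).2 hx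
  | true =>
    have hall : ∀ x ∈ pvBOps, x ∉ tokens := (PySem.Set.isdisjoint_iff _ _).1 h
    simp only [Bool.not_true]
    refine List.any_eq_false.2 ?_
    intro t ht hc
    rw [hset] at hc
    exact hall t ((PySem.Set.contains_iff _ _).1 hc) ht

lemma ruleA_eq_norm (seg : List Char) :
    (pvEmit (PySem.Chars.strip seg)).flatMap pvRuleA = pvBNorm seg := by
  by_cases h : PySem.Chars.strip seg = []
  · simp [pvEmit, pvBNorm, h]
  · simp only [pvEmit, if_neg h, List.flatMap_cons, List.flatMap_nil, List.append_nil]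
    simp only [pvBNorm, if_neg h, pvRuleA]
    by_cases hlen : (PySem.Chars.split₀ (PySem.Chars.strip seg)).length ≤ 1
    · rw [if_pos hlen, if_neg (by rintro ⟨h1, _⟩; omega)]
    · rw [if_neg hlen]
      cases hdis : PySem.Set.isdisjoint pvBOps (PySem.Chars.split₀ (PySem.Chars.strip seg)) with
      | false =>
        have hany : (PySem.Chars.split₀ (PySem.Chars.strip seg)).any
            (fun t => PySem.Set.contains pvAOps t) = true := by
          rw [any_eq_not_isdisjoint, hdis]; rfl
        rw [if_pos hany, if_neg (by simp)]
      | true =>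
        have hany : (PySem.Chars.split₀ (PySem.Chars.strip seg)).any
            (fun t => PySem.Set.contains pvAOps t) = false := by
          rw [any_eq_not_isdisjoint, hdis]; rfl
        rw [if_neg (by rw [hany]; simp), if_pos ⟨by omega, rfl⟩]

lemma finish_shape (r : List (List Char) × List Char) :
    (if PySem.Chars.strip r.2 ≠ [] then r.1 ++ [PySem.Chars.strip r.2] else r.1) = pvFinish r := by
  by_cases h : PySem.Chars.strip r.2 = [] <;> simp [pvFinish, pvEmit, h]

-- ===== VERDICT (by name: the statement is the Claim_ definition above) =====
theorem split_macro_args_spec : Claim_equal_split_macro_args := by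
  intro args_str _
  show split_macro_args args_str = split_macro_args_alt args_str
  simp only [split_macro_args, split_macro_args_alt]
  rw [finish_shape, pvAPost_eq_flatMap]
  have hscan := scan_main (pvSplit args_str.toList) none 0 []
    (pvSplit_ne_nil _) (pvSplit_no_comma _)
  rw [pvJoin_pvSplit] at hscan
  simp only [pvCur] at hscan
  rw [hscan, splitOn_comma]
  simp only [List.nil_append, List.flatMap_assoc, ruleA_eq_norm]
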